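-- pv_equiv track=rewrite | github.com/khaphong229/CODE-PYTHON-PTIT | TICH CHU SO TONG CHU SO.py | tinh
-- ===== SOURCE A (Python) =====
-- def tinh(n):
--     tich=1
--     tong=0
--     length=len(str(n))
--     for i in range(length):
--         if i%2==0:
--             if int(str(n)[i])==0:
--                 continue
--             else:
--                 tich*=int(str(n)[i])
--         else:
--             tong+=int(str(n)[i])
--     return tich, tong
-- ===== SOURCE B (Python) =====
-- def tinh(n):
--     def go(cs):
--         if not cs:
--             return (1, 0)
--         e = int(cs[0])
--         t = e if e != 0 else 1
--         if len(cs) == 1: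
--             return (t, 0)
--         p, s = go(cs[2:])
--         return (t * p, int(cs[1]) + s)
--     return go(str(n))
-- ===== Notes on version B (the rewrite author's own statement) =====
-- stated objective: alternative
-- what changed: Replaces A's index loop over range(len(str(n))) with a parity branch and repeated str(n)[i]/int() indexing by a direct structural recursion over the digit string consuming a pair of characters per step, with no indices or parity tests.
import Mathlib
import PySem

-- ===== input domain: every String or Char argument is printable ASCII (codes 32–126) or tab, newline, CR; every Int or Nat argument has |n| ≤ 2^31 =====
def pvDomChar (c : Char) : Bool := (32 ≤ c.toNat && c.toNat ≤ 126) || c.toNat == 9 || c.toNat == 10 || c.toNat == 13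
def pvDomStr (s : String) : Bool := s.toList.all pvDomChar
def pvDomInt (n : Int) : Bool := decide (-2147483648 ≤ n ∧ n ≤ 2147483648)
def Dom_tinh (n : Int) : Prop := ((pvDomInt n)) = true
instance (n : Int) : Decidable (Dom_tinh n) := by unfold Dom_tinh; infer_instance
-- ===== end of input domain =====

-- B is an alternative decomposition: structural recursion over the digit string consuming a pair
-- of characters per step instead of A's index loop with a parity branch; return values proved equal on Pre_.

-- int(c) for a one-character string c (used by both ports; A applies it to str(n)[i], B to cs[0]/cs[1])
def pvDigitInt (c : Char) : Int := (PySem.Int.ofChars? [c]).getD 0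

-- ===== PORT A =====
def tinh (n : Int) : Int × Int :=
  let s := PySem.Int.toStr n
  let length := PySem.Str.len s
  (PySem.List.pyRange 0 length 1).foldl
    (fun (st : Int × Int) i =>
      if i % 2 == 0 then
        if pvDigitInt ((PySem.Str.pyGet? s i).getD ' ') == 0 then st
        else (st.1 * pvDigitInt ((PySem.Str.pyGet? s i).getD ' '), st.2)
      else (st.1, st.2 + pvDigitInt ((PySem.Str.pyGet? s i).getD ' ')))
    (1, 0)

-- ===== PORT B =====
-- helper: Source B's inner 'go' on the character list
def tinhGo : List Char → Int × Int
  | [] => (1, 0)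
  | [c] => (if pvDigitInt c ≠ 0 then pvDigitInt c else 1, 0)
  | c :: d :: rest =>
    let p := tinhGo rest
    ((if pvDigitInt c ≠ 0 then pvDigitInt c else 1) * p.1, pvDigitInt d + p.2)

def tinh_alt (n : Int) : Int × Int := tinhGo (PySem.Int.toChars n)

-- ===== PRECONDITION & SPEC =====
-- Pre_: A raises ValueError on negative n (int of the sign character); B raises there too.
def Pre_tinh (n : Int) : Prop := 0 ≤ n
instance (n : Int) : Decidable (Pre_tinh n) := by unfold Pre_tinh; infer_instance
def pvWitness_tinh : Int := 2025

def Spec_tinh (n : Int) (out : Int × Int) : Prop := out = tinh_alt n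
instance (n : Int) (out : Int × Int) : Decidable (Spec_tinh n out) := by unfold Spec_tinh; infer_instance

-- ===== CLAIM (what is proved, stated in full; the proofs are below) =====
def Claim_equal_tinh : Prop := ∀ (n : Int), Dom_tinh n → Pre_tinh n → Spec_tinh n (tinh n)

-- ===== LEMMAS AND PROOFS =====

-- A's loop over enumerated characters, with the start index generalized to any even a,
-- computes B's recursion applied to the accumulators.
lemma tinh_fold_eq_go (cs : List Char) : ∀ (a t s : Int), a % 2 = 0 →
    (PySem.List.enumerate cs a).foldl
      (fun (st : Int × Int) (p : Int × Char) =>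
        if p.1 % 2 == 0 then
          if pvDigitInt p.2 == 0 then st
          else (st.1 * pvDigitInt p.2, st.2)
        else (st.1, st.2 + pvDigitInt p.2))
      (t, s)
    = (t * (tinhGo cs).1, s + (tinhGo cs).2) := by
  induction cs using tinhGo.induct with
  | case1 => intro a t s _; simp [PySem.List.enumerate_nil, tinhGo]
  | case2 c =>
    intro a t s ha
    have h0 : (a % 2 == 0) = true := by simp [ha]
    simp only [PySem.List.enumerate_cons, PySem.List.enumerate_nil, List.foldl_cons,
      List.foldl_nil, tinhGo, h0, if_true]
    by_cases h : pvDigitInt c = 0 <;> simp [h]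
  | case3 c d rest ih =>
    intro a t s ha
    have h0 : (a % 2 == 0) = true := by simp [ha]
    have h1 : ((a + 1) % 2 == 0) = false := by simp; omega
    have ha2 : (a + 1 + 1) % 2 = 0 := by omega
    simp only [PySem.List.enumerate_cons, List.foldl_cons, h0, h1, if_true,
      Bool.false_eq_true, if_false, tinhGo]
    by_cases h : pvDigitInt c = 0
    · simp only [h, beq_self_eq_true, if_true, ne_eq, not_true_eq_false, if_false]
      rw [ih (a + 1 + 1) t (s + pvDigitInt d) ha2]
      rw [Prod.mk.injEq]; constructor <;> ring
    · have hb : (pvDigitInt c == 0) = false := by simp [h]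
      simp only [hb, Bool.false_eq_true, if_false, ne_eq, h, not_false_eq_true, if_true]
      rw [ih (a + 1 + 1) (t * pvDigitInt c) (s + pvDigitInt d) ha2]
      rw [Prod.mk.injEq]; constructor <;> ring

-- ===== VERDICT (by name: the statement is the Claim_ definition above) =====
theorem tinh_spec : Claim_equal_tinh := by
  intro n _ _
  unfold Spec_tinh tinh tinh_alt
  have hb := tinh_fold_eq_go (PySem.Int.toChars n) 0 1 0 (by decide)
  rw [show (PySem.List.enumerate (PySem.Int.toChars n) 0) = (PySem.List.pyRange 0 (PySem.List.len (PySem.Int.toChars n)) 1).map (fun j => (j, PySem.List.pyGetD (PySem.Int.toChars n) j ' ')) from PySem.List.enumerate_eq_map_pyRange (PySem.Int.toChars n) ' ', List.foldl_map] at hb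
  simp only [one_mul, zero_add, Prod.mk.eta] at hb
  simp only [PySem.List.len_eq] at hb
  simp only [PySem.Str.len_eq, PySem.Int.toList_toStr]
  rw [← hb]
  apply PySem.List.foldl_congr_mem
  intro acc j hj
  have : (PySem.Str.pyGet? (PySem.Int.toStr n) j).getD ' ' = PySem.List.pyGetD (PySem.Int.toChars n) j ' ' := by
    simp [PySem.List.pyGetD, PySem.Int.toList_toStr]
  rw [this]
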